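-- pv_equiv track=rewrite | github.com/nermadie/CodeForces_Solutions | CodeforcesRound925Div3/prob02.py | can_equalize_water
-- ===== SOURCE A (Python) =====
-- def can_equalize_water(n, containers):
--     average = sum(containers) // n
--     temp = 0
--     for i in range(n-1, 0, -1):
--         if containers[i] > average + temp:
--             return "NO"
--         else:
--             temp += average - containers[i]
--     return "YES"
-- ===== SOURCE B (Python) =====
-- def can_equalize_water(n, containers):
--     # Staged formulation: pouring left-to-right succeeds iff no prefix
--     # deviation sum (over the first k containers, k = 1..n-1) drops below
--     # the total deviation target = sum - n*average.  Instead of scanning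
--     # suffixes backwards with an early return, compute the MINIMUM prefix
--     # deviation in one forward sweep over the elements and compare once.
--     average = sum(containers) // n
--     if n <= 1:
--         return "YES"
--     target = sum(containers[:n]) - n * average
--     prefix = containers[0] - average
--     low = prefix
--     for c in containers[1:n-1]:
--         prefix += c - average
--         low = min(low, prefix)
--     return "NO" if low < target else "YES"
-- ===== Notes on version B (the rewrite author's own statement) =====
-- stated objective: alternative
-- what changed: Replaces A's backward suffix scan with an early-return deficit accumulator by a forward sweep that computes the minimum prefix deviation over the first n-1 containers and compares it once against the total deviation target.
import Mathlib
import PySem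

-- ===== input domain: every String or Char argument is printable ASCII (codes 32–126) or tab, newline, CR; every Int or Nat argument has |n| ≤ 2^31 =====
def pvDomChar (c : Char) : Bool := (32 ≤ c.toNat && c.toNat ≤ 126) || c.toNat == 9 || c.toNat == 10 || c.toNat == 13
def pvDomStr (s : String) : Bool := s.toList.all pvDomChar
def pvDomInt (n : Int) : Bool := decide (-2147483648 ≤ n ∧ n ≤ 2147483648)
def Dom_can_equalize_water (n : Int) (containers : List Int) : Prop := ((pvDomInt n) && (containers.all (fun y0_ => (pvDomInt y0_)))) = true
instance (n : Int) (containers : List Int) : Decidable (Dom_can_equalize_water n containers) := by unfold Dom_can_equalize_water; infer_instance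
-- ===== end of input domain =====

-- B replaces A's backward suffix scan (early-return deficit accumulator) by a forward
-- sweep computing the minimum prefix deviation, compared once against the total
-- deviation target (alternative decomposition; return value only, no mutation).

-- ===== PORT A =====
-- A's loop: for i in range(n-1, 0, -1), early return "NO"
def pvALoop (cs : List Int) (avg : Int) : List Int → Int → String
  | [], _ => "YES"
  | i :: rest, temp =>
    match PySem.List.pyGet? cs i with
    | none => "YES"  -- Python raises IndexError here; excluded by Pre_
    | some c => if c > avg + temp then "NO" else pvALoop cs avg rest (temp + (avg - c))

def can_equalize_water (n : Int) (containers : List Int) : String :=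
  let average := PySem.Int.floordiv containers.sum n
  pvALoop containers average (PySem.List.pyRange (n-1) 0 (-1)) 0

-- ===== PORT B =====
def can_equalize_water_alt (n : Int) (containers : List Int) : String :=
  let average := PySem.Int.floordiv containers.sum n
  if n ≤ 1 then "YES"
  else
    let target := (PySem.List.slice containers none (some n)).sum - n * average
    match PySem.List.pyGet? containers 0 with
    | none => "YES"  -- Python raises IndexError here; excluded by Pre_
    | some c0 =>
      let st := (PySem.List.slice containers (some 1) (some (n - 1))).foldl
          (fun (pl : Int × Int) c => (pl.1 + (c - average), min pl.2 (pl.1 + (c - average))))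
          (c0 - average, c0 - average)
      if st.2 < target then "NO" else "YES"

-- ===== PRECONDITION & SPEC =====
-- Pre_ excludes exactly where A raises: n = 0 (ZeroDivisionError) and
-- 2 ≤ n with n > len(containers) (IndexError at containers[n-1]).
def Pre_can_equalize_water (n : Int) (containers : List Int) : Prop :=
  n ≠ 0 ∧ (n < 0 ∨ n = 1 ∨ n ≤ containers.length)
instance (n : Int) (containers : List Int) : Decidable (Pre_can_equalize_water n containers) := by
  unfold Pre_can_equalize_water; infer_instance
def pvWitness_can_equalize_water : Int × List Int := (3, [1, 2, 3])

def Spec_can_equalize_water (n : Int) (containers : List Int) (out : String) : Prop := out = can_equalize_water_alt n containers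
instance (n : Int) (containers : List Int) (out : String) : Decidable (Spec_can_equalize_water n containers out) := by unfold Spec_can_equalize_water; infer_instance

-- ===== CLAIM (what is proved, stated in full; the proofs are below) =====
def Claim_equal_can_equalize_water : Prop := ∀ (n : Int) (containers : List Int), Dom_can_equalize_water n containers → Pre_can_equalize_water n containers → Spec_can_equalize_water n containers (can_equalize_water n containers)

-- ===== LEMMAS AND PROOFS =====

-- deviation of element j from the average (proof-only helper)
def pvF (cs : List Int) (avg : Int) (j : Nat) : Int := cs.getD j 0 - avg

-- A's backward loop returns "NO" iff some suffix deviation sum (over indices i..m) exceeds t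
lemma pvALoop_no (cs : List Int) (avg : Int) :
    ∀ (m : Nat) (t : Int), (∀ i : Nat, 1 ≤ i → i ≤ m → i < cs.length) →
    (pvALoop cs avg (PySem.List.pyRange (m : Int) 0 (-1)) t = "NO" ↔
      ∃ i, 1 ≤ i ∧ i ≤ m ∧ t < ∑ j ∈ Finset.Ico i (m + 1), pvF cs avg j) := by
  intro m
  induction m with
  | zero =>
    intro t _
    rw [PySem.List.pyRange_neg_one_eq_nil (by norm_num)]
    refine iff_of_false (by simp [pvALoop]) ?_
    rintro ⟨i, h1, h2, -⟩
    omega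
  | succ m ih =>
    intro t h
    have hlt : m + 1 < cs.length := h (m + 1) (by omega) (le_refl _)
    rw [PySem.List.pyRange_neg_one_cons (by exact_mod_cast Nat.succ_pos m)]
    have hm1 : ((m + 1 : Nat) : Int) - 1 = (m : Int) := by push_cast; ring
    rw [hm1]
    have hget : PySem.List.pyGet? cs ((m + 1 : Nat) : Int) = some (cs.getD (m + 1) 0) := by
      rw [PySem.List.pyGet?_natCast, List.getElem?_eq_getElem hlt, List.getD_eq_getElem cs 0 hlt]
    simp only [pvALoop, hget]
    by_cases hc : cs.getD (m + 1) 0 > avg + t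
    · rw [if_pos hc]
      refine iff_of_true rfl ⟨m + 1, by omega, le_refl _, ?_⟩
      rw [Finset.sum_Ico_succ_top (le_refl (m + 1))]
      simp only [Finset.Ico_self, Finset.sum_empty, zero_add, pvF]
      omega
    · rw [if_neg hc, ih (t + (avg - cs.getD (m + 1) 0)) (fun i h1 h2 => h i h1 (by omega))]
      constructor
      · rintro ⟨i, h1, h2, hs⟩
        refine ⟨i, h1, by omega, ?_⟩
        rw [Finset.sum_Ico_succ_top (by omega : i ≤ m + 1)]
        have hf : pvF cs avg (m + 1) = cs.getD (m + 1) 0 - avg := rfl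
        linarith [hs]
      · rintro ⟨i, h1, h2, hs⟩
        rcases Nat.lt_or_ge i (m + 1) with hi | hi
        · refine ⟨i, h1, by omega, ?_⟩
          rw [Finset.sum_Ico_succ_top (by omega : i ≤ m + 1)] at hs
          have hf : pvF cs avg (m + 1) = cs.getD (m + 1) 0 - avg := rfl
          linarith [hs]
        · exfalso
          have hi' : i = m + 1 := by omega
          subst hi'
          rw [Finset.sum_Ico_succ_top (le_refl (m + 1))] at hs
          simp only [Finset.Ico_self, Finset.sum_empty, zero_add, pvF] at hs
          omega

lemma pvALoop_dichot (cs : List Int) (avg : Int) :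
    ∀ (l : List Int) (t : Int),
    pvALoop cs avg l t = "NO" ∨ pvALoop cs avg l t = "YES" := by
  intro l
  induction l with
  | nil => intro t; right; rfl
  | cons i rest ih =>
    intro t
    unfold pvALoop
    cases PySem.List.pyGet? cs i with
    | none => right; rfl
    | some c =>
      by_cases h : c > avg + t
      · left; simp [h]
      · simpa [h] using ih (t + (avg - c))

lemma pv_take_sum (cs : List Int) : ∀ (k : Nat), k ≤ cs.length →
    (cs.take k).sum = ∑ i ∈ Finset.range k, cs.getD i 0 := by
  intro k hk
  induction k with
  | zero => simp
  | succ k ih =>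
    rw [List.take_add_one, List.sum_append, ih (by omega), Finset.sum_range_succ]
    have h1 : cs[k]? = some cs[k] := List.getElem?_eq_getElem (by omega)
    rw [h1, List.getD_eq_getElem cs 0 (by omega)]
    simp only [Option.toList_some, List.sum_cons, List.sum_nil, add_zero]
    rfl

-- mapped-subtraction sum
lemma pv_map_sub_sum (avg : Int) : ∀ (l : List Int),
    (l.map (fun c => c - avg)).sum = l.sum - l.length * avg := by
  intro l
  induction l with
  | nil => simp
  | cons c l ih => simp [ih]; ring

-- B's fold: the min component drops below t iff the initial low does, or some
-- nonempty prefix of the scanned list pushes the running sum below t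
lemma pvFold_snd_lt (avg t : Int) : ∀ (l : List Int) (p low : Int),
    ((l.foldl (fun (pl : Int × Int) c => (pl.1 + (c - avg), min pl.2 (pl.1 + (c - avg)))) (p, low)).2 < t)
    ↔ (low < t ∨ ∃ k : Nat, k < l.length ∧ p + ((l.take (k+1)).map (fun c => c - avg)).sum < t) := by
  intro l
  induction l with
  | nil =>
    intro p low
    simp [List.foldl]
  | cons c l ih =>
    intro p low
    rw [List.foldl_cons, ih]
    constructor
    · rintro (hlow | ⟨k, hk, hs⟩)
      · rcases min_lt_iff.mp hlow with h | h
        · exact Or.inl h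
        · exact Or.inr ⟨0, by simp, by simpa using h⟩
      · exact Or.inr ⟨k + 1, by simpa using Nat.succ_lt_succ hk,
          by simpa [List.take_succ_cons, add_assoc] using hs⟩
    · rintro (hlow | ⟨k, hk, hs⟩)
      · exact Or.inl (min_lt_iff.mpr (Or.inl hlow))
      · cases k with
        | zero =>
          left
          refine min_lt_iff.mpr (Or.inr ?_)
          simpa using hs
        | succ k =>
          right
          exact ⟨k, by simpa using hk, by simpa [List.take_succ_cons, add_assoc] using hs⟩

-- ===== VERDICT (by name: the statement is the Claim_ definition above) =====
-- the shared suffix/prefix characterisation bridge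
lemma pv_cond_bridge (cs : List Int) (avg : Int) (m : Nat) :
    ((∃ i, 1 ≤ i ∧ i ≤ m ∧ (0:Int) < ∑ j ∈ Finset.Ico i (m + 1), pvF cs avg j) ↔
     (∃ j, j < m ∧
        ∑ i ∈ Finset.Ico 0 (j + 1), pvF cs avg i < ∑ i ∈ Finset.Ico 0 (m + 1), pvF cs avg i)) := by
  constructor
  · rintro ⟨i, h1, h2, hs⟩
    refine ⟨i - 1, by omega, ?_⟩
    have hsplit := Finset.sum_Ico_consecutive (pvF cs avg) (by omega : 0 ≤ i - 1 + 1) (by omega : i - 1 + 1 ≤ m + 1)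
    have hi : i - 1 + 1 = i := by omega
    rw [hi] at hsplit
    rw [hi]
    linarith [hs, hsplit]
  · rintro ⟨j, h2, hs⟩
    refine ⟨j + 1, by omega, by omega, ?_⟩
    have hsplit := Finset.sum_Ico_consecutive (pvF cs avg) (by omega : 0 ≤ j + 1) (by omega : j + 1 ≤ m + 1)
    linarith [hs, hsplit]

-- prefixes of B's slice are prefix-deviation sums of the whole list
lemma pv_body_prefix (cs : List Int) (avg : Int) (m : Nat) (hm : 1 ≤ m) (hlen : m < cs.length) :
    ∀ k : Nat, k < m - 1 →
    (cs.getD 0 0 - avg) + (((((cs.drop 1).take (m - 1)).take (k + 1)).map (fun c => c - avg)).sum)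
      = ∑ i ∈ Finset.Ico 0 (k + 2), pvF cs avg i := by
  intro k hk
  have h1 : ((cs.drop 1).take (m - 1)).take (k + 1) = (cs.drop 1).take (k + 1) := by
    rw [List.take_take]
    congr 1
    omega
  have h2 : (cs.drop 1).take (k + 1) = (cs.take (k + 2)).drop 1 := by
    have hadd : 1 + (k + 1) = k + 2 := by omega
    rw [List.take_drop, hadd]
  have hlen2 : ((cs.take (k + 2)).drop 1).length = k + 1 := by
    simp
    omega
  have h3 : cs.take (k + 2) = cs.take 1 ++ (cs.take (k + 2)).drop 1 := by
    have := List.take_append_drop 1 (cs.take (k + 2))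
    rw [List.take_take] at this
    have hmin : min 1 (k + 2) = 1 := by omega
    rw [hmin] at this
    exact this.symm
  have hsum : ((cs.take (k + 2)).drop 1).sum = (cs.take (k + 2)).sum - (cs.take 1).sum := by
    have := congrArg List.sum h3
    rw [List.sum_append] at this
    omega
  rw [h1, pv_map_sub_sum, h2, hlen2, hsum,
      pv_take_sum cs (k + 2) (by omega), pv_take_sum cs 1 (by omega)]
  simp only [pvF, Finset.sum_sub_distrib, Finset.sum_const, nsmul_eq_mul,
    ← Finset.range_eq_Ico, Finset.sum_range_one, Finset.card_range]
  push_cast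
  ring

theorem can_equalize_water_spec : Claim_equal_can_equalize_water := by
  intro n cs _ hpre
  obtain ⟨hn0, hcase⟩ := hpre
  unfold Spec_can_equalize_water
  by_cases hn1 : n ≤ 1
  · -- n < 0 or n = 1: A's range is empty, B takes the trivial branch
    simp only [can_equalize_water, can_equalize_water_alt, if_pos hn1]
    rw [PySem.List.pyRange_neg_one_eq_nil (by omega : n - 1 ≤ 0)]
    rfl
  · -- 2 ≤ n ≤ len
    have hlen : n ≤ (cs.length : Int) := by
      rcases hcase with h | h | h
      · omega
      · omega
      · exact h
    simp only [can_equalize_water, can_equalize_water_alt, if_neg hn1]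
    set avg := PySem.Int.floordiv cs.sum n with havg
    set m : Nat := (n - 1).toNat with hm
    have hmn : (m : Int) = n - 1 := Int.toNat_of_nonneg (by omega)
    have hm1 : 1 ≤ m := by omega
    have hmlen : m < cs.length := by omega
    have h0lt : 0 < cs.length := by omega
    have hget0 : PySem.List.pyGet? cs 0 = some (cs.getD 0 0) := by
      rw [List.getD_eq_getElem cs 0 h0lt]
      simp [PySem.List.pyGet?, PySem.List.pyIdx?, h0lt]
    rw [← hmn, hget0]
    have hbody : PySem.List.slice cs (some 1) (some ((m : Int))) = (cs.drop 1).take (m - 1) := by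
      have h1 : (1 : Int) = ((1 : Nat) : Int) := rfl
      rw [h1, PySem.List.slice_natCast]
    have hA := pvALoop_no cs avg m 0 (fun i _ h2 => by omega)
    have htarget : (PySem.List.slice cs none (some n)).sum - n * avg =
        ∑ i ∈ Finset.Ico 0 (m + 1), pvF cs avg i := by
      rw [PySem.List.slice_to cs (by omega : 0 ≤ n)]
      have hnt : n.toNat = m + 1 := by omega
      rw [hnt, pv_take_sum cs (m + 1) (by omega)]
      simp only [pvF, Finset.sum_sub_distrib, Finset.sum_const, Finset.card_range,
        nsmul_eq_mul, ← Finset.range_eq_Ico]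
      have hc : ((m + 1 : Nat) : Int) = n := by omega
      rw [hc]
    set t := ∑ i ∈ Finset.Ico 0 (m + 1), pvF cs avg i with ht
    -- characterise B's branch condition
    have hB := pvFold_snd_lt avg ((PySem.List.slice cs none (some n)).sum - n * avg)
        ((cs.drop 1).take (m - 1)) (cs.getD 0 0 - avg) (cs.getD 0 0 - avg)
    have hblen : ((cs.drop 1).take (m - 1)).length = m - 1 := by
      simp
      omega
    have hp0 : cs.getD 0 0 - avg = ∑ i ∈ Finset.Ico 0 (0 + 1), pvF cs avg i := by
      simp [pvF]
    have hBcond : (((cs.drop 1).take (m - 1)).foldl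
          (fun (pl : Int × Int) c => (pl.1 + (c - avg), min pl.2 (pl.1 + (c - avg))))
          (cs.getD 0 0 - avg, cs.getD 0 0 - avg)).2 < (PySem.List.slice cs none (some n)).sum - n * avg
        ↔ ∃ j, j < m ∧ ∑ i ∈ Finset.Ico 0 (j + 1), pvF cs avg i < t := by
      rw [hB, htarget, hblen]
      constructor
      · rintro (h0 | ⟨k, hk, hs⟩)
        · exact ⟨0, by omega, by rw [← hp0]; exact h0⟩
        · refine ⟨k + 1, by omega, ?_⟩
          rw [← pv_body_prefix cs avg m hm1 hmlen k hk]
          exact hs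
      · rintro ⟨j, hj, hs⟩
        cases j with
        | zero => exact Or.inl (by rw [hp0]; exact hs)
        | succ k =>
          refine Or.inr ⟨k, by omega, ?_⟩
          rw [pv_body_prefix cs avg m hm1 hmlen k (by omega)]
          exact hs
    rw [hbody]
    by_cases hP : ∃ i, 1 ≤ i ∧ i ≤ m ∧ (0:Int) < ∑ j ∈ Finset.Ico i (m + 1), pvF cs avg j
    · -- both return "NO"
      have hAno := hA.mpr hP
      have hBlt := hBcond.mpr ((pv_cond_bridge cs avg m).mp hP)
      rw [hAno]
      exact (if_pos hBlt).symm
    · have hA' : pvALoop cs avg (PySem.List.pyRange (m : Int) 0 (-1)) 0 = "YES" := by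
        rcases pvALoop_dichot cs avg (PySem.List.pyRange (m : Int) 0 (-1)) 0 with h | h
        · exact absurd (hA.mp h) hP
        · exact h
      have hBge : ¬ (((cs.drop 1).take (m - 1)).foldl
          (fun (pl : Int × Int) c => (pl.1 + (c - avg), min pl.2 (pl.1 + (c - avg))))
          (cs.getD 0 0 - avg, cs.getD 0 0 - avg)).2 < (PySem.List.slice cs none (some n)).sum - n * avg := by
        intro h
        exact hP ((pv_cond_bridge cs avg m).mpr (hBcond.mp h))
      rw [hA']
      exact (if_neg hBge).symm
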